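-- pv_equiv track=rewrite | github.com/jaspreetdogra/coddy.tech | Python/Journey/05_Daily_Challenges/2025-10-18_summer_book_sorter.py | summerBookSorter
-- ===== SOURCE A (Python) =====
-- def summerBookSorter(chapters):
--     # Challenge
--     # Medium
--     #
--     # Create a function named summerBookSorter that receives chapters as its parameter.
--     #
--     # This function aims to simulate organizing a list of book chapters during a lazy summer afternoon.
--     # Given an input 2D array where each nested list represents a set of page numbers in a chapter,
--     # the function should perform the following operations:
--     #
--     # 1. Reverse the order of chapters in each nested list one by one.
--     # 2. Sort each nested list in descending order.
--     # 3. Combine elements across nested lists based on their positions — that is,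
--     #    sum up the elements at the same index across all nested lists.
--     #
--     # The function should return a new 2D integer array with the combined and sorted chapters.
--     #
--     # Parameters:
--     # chapters (list of list of int):
--     #     A 2D integer array where each nested list represents a set of page numbers in a chapter.
--     #
--     # Returns:
--     # list of list of int:
--     #     A 2D integer array where each nested list has been reversed, sorted in descending order,
--     #     and then combined with others based on the indices of their elements.
--     #
--     # Example:
--     # Input:
--     # chapters = [
--     #     [1, 3, 5],
--     #     [2, 4, 6],
--     #     [7, 9, 11]
--     # ]
--     #
--     # Step 1 → Reverse each chapter:
--     #     [[5, 3, 1], [6, 4, 2], [11, 9, 7]]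
--     #
--     # Step 2 → Sort each chapter in descending order (already reversed above, so same result):
--     #     [[5, 3, 1], [6, 4, 2], [11, 9, 7]]
--     #
--     # Step 3 → Combine elements across chapters (sum by index):
--     #     [
--     #         [5 + 6 + 11, 3 + 4 + 9, 1 + 2 + 7]
--     #     ] → [[22, 16, 10]]
--     #
--     # Step 4 → Sort combined list in descending order (optional depending on final requirement)
--     #     [[22, 16, 10]]
--     #
--     # Output:
--     # [[22, 16, 10]]
--     #
--     # Edge Cases to Consider:
--     # - Empty input list (should return [])
--     # - Uneven sublist lengths (missing positions treated as 0 during combination)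
--     # - Single chapter (should still reverse and sort properly)
--
--     # Step 1: Handle edge case — empty list
--     if not chapters:
--         return []
--
--     # Step 2: Reverse and sort each chapter in descending order
--     processed = [sorted(ch[::-1], reverse=True) for ch in chapters]
--
--     # Step 3: Find the maximum length among all chapters to handle uneven lengths
--     max_len = max(len(ch) for ch in processed)
--
--     # Step 4: Initialize a list to hold combined sums
--     combined = [0] * max_len
--
--     # Step 5: Combine elements by their positions across all chapters
--     for ch in processed:
--         for i in range(len(ch)):
--             combined[i] += ch[i]
--
--     # Step 6: Wrap combined list inside another list (to maintain 2D array format)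
--     # and sort it in descending order
--     return [sorted(combined, reverse=True)]
-- ===== SOURCE B (Python) =====
-- def summerBookSorter(chapters):
--     if not chapters:
--         return []
--     # reverse then sort each chapter descending
--     cols = [sorted(ch[::-1], reverse=True) for ch in chapters]
--     # combine by position via a column-wise transpose walk (missing entries count as 0)
--     combined = []
--     while any(cols):
--         combined.append(sum(ch[0] for ch in cols if ch))
--         cols = [ch[1:] for ch in cols]
--     return [sorted(combined, reverse=True)]
-- ===== Notes on version B (the rewrite author's own statement) =====
-- stated objective: alternative
-- what changed: Replaces the max-length/preallocated-buffer indexed accumulation with a column-wise transpose walk: repeatedly sum the heads of the non-empty chapters and drop to the tails, so no index arithmetic or mutable preallocated array is needed.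
import Mathlib
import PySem

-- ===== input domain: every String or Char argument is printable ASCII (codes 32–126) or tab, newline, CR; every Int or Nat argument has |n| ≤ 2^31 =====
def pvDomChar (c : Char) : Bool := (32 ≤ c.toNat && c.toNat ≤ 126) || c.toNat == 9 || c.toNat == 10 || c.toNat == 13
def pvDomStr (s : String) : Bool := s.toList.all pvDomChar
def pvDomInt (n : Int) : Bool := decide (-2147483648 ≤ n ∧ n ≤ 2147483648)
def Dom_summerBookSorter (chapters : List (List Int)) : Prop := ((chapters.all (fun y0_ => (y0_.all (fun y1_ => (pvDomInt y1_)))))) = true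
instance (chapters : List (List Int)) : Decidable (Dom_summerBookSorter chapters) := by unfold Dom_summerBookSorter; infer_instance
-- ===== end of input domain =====

-- B replaces A's max-length/preallocated-buffer indexed accumulation with a
-- column-wise transpose walk (sum the heads, recurse on the tails): an alternative of similar cost.

-- ===== PORT A =====
def summerBookSorter (chapters : List (List Int)) : List (List Int) :=
  if chapters = [] then []
  else
    let processed := chapters.map (fun ch =>
      PySem.List.sorted ((PySem.List.slice? ch none none (-1)).getD []) (fun x => x) true)
    let maxLen := (PySem.List.max? (processed.map List.length) (fun x => x)).getD 0
    let combined := List.replicate maxLen (0 : Int)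
    let combined := processed.foldl (fun combined ch =>
      (PySem.List.pyRange 0 (ch.length : Int) 1).foldl (fun acc i =>
        PySem.List.pySetD acc i (PySem.List.pyGetD acc i 0 + PySem.List.pyGetD ch i 0)) combined)
      combined
    [PySem.List.sorted combined (fun x => x) true]

-- ===== PORT B =====
-- termination helpers for B's while-loop: dropping every head strictly shrinks the total size
theorem pvDropLenLe (cols : List (List Int)) :
    ((cols.map (fun ch => ch.drop 1)).map List.length).sum ≤ (cols.map List.length).sum := by
  induction cols with
  | nil => simp
  | cons d ds ih => simp only [List.map_cons, List.sum_cons, List.length_drop]; omega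

theorem pvDropLenLt (cols : List (List Int)) (h : cols.any (fun ch => !ch.isEmpty) = true) :
    ((cols.map (fun ch => ch.drop 1)).map List.length).sum < (cols.map List.length).sum := by
  induction cols with
  | nil => simp at h
  | cons c cs ih =>
    simp only [List.any_cons, Bool.or_eq_true] at h
    simp only [List.map_cons, List.sum_cons, List.length_drop]
    rcases h with h | h
    · have hc : c.length ≠ 0 := by cases c <;> simp_all
      have := pvDropLenLe cs
      omega
    · have := ih h
      omega

-- the while-loop: while any(cols): append the head sum, step to the tails
def pvColSums (cols : List (List Int)) : List Int :=
  if h : cols.any (fun ch => !ch.isEmpty) = true then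
    ((cols.filter (fun ch => !ch.isEmpty)).map (fun ch => ch.headD 0)).sum
      :: pvColSums (cols.map (fun ch => ch.drop 1))
  else []
termination_by (cols.map List.length).sum
decreasing_by simpa using pvDropLenLt cols h

def summerBookSorter_alt (chapters : List (List Int)) : List (List Int) :=
  if chapters = [] then []
  else
    let cols := chapters.map (fun ch =>
      PySem.List.sorted ((PySem.List.slice? ch none none (-1)).getD []) (fun x => x) true)
    let combined := pvColSums cols
    [PySem.List.sorted combined (fun x => x) true]

-- ===== PRECONDITION & SPEC =====
def Spec_summerBookSorter (chapters : List (List Int)) (out : List (List Int)) : Prop := out = summerBookSorter_alt chapters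
instance (chapters : List (List Int)) (out : List (List Int)) : Decidable (Spec_summerBookSorter chapters out) := by unfold Spec_summerBookSorter; infer_instance

-- ===== CLAIM (what is proved, stated in full; the proofs are below) =====
def Claim_equal_summerBookSorter : Prop := ∀ (chapters : List (List Int)), Dom_summerBookSorter chapters → Spec_summerBookSorter chapters (summerBookSorter chapters)

-- ===== LEMMAS AND PROOFS =====

-- the maximum chapter length, as A's running max
def pvMx (ls : List (List Int)) : Nat := ls.foldl (fun a l => max a l.length) 0

-- the column sum at position j (missing entries contribute 0)
def pvCol (j : Nat) (ls : List (List Int)) : Int := (ls.map (fun l => l.getD j 0)).sum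

theorem pvMx_spec (ls : List (List Int)) : ∀ l ∈ ls, l.length ≤ pvMx ls :=
  fun l hl => (PySem.List.le_foldl_max_nat ls List.length 0).2 l hl

theorem pvMx_drop (ls : List (List Int)) :
    pvMx (ls.map (fun ch => ch.drop 1)) = pvMx ls - 1 := by
  unfold pvMx
  have key : ∀ (ls : List (List Int)) (a : Nat),
      (ls.map (fun ch => ch.drop 1)).foldl (fun a l => max a l.length) (a - 1)
        = (ls.foldl (fun a l => max a l.length) a) - 1 := by
    intro ls
    induction ls with
    | nil => intro a; simp
    | cons c cs ih =>
      intro a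
      simp only [List.map_cons, List.foldl_cons, List.length_drop]
      rw [show max (a - 1) (c.length - 1) = max a c.length - 1 by omega]
      exact ih _
  simpa using key ls 0

theorem pvMx_of_all_nil (ls : List (List Int)) (h : ∀ l ∈ ls, l = []) : pvMx ls = 0 := by
  unfold pvMx
  induction ls with
  | nil => rfl
  | cons c cs ih =>
    have hc := h c (List.mem_cons_self ..)
    subst hc
    simpa using ih (fun l hl => h l (List.mem_cons_of_mem _ hl))

theorem pvMx_zero (ls : List (List Int)) (h : pvMx ls = 0) : ∀ l ∈ ls, l = [] := by
  intro l hl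
  have := pvMx_spec ls l hl
  rw [h] at this
  exact List.eq_nil_of_length_eq_zero (by omega)

theorem pvHeads_sum (ls : List (List Int)) :
    ((ls.filter (fun ch => !ch.isEmpty)).map (fun ch => ch.headD 0)).sum = pvCol 0 ls := by
  induction ls with
  | nil => simp [pvCol]
  | cons c cs ih =>
    cases c with
    | nil => simpa [pvCol, List.filter_cons] using ih
    | cons x xs =>
      simp [pvCol] at ih ⊢
      simp [ih]

theorem pvCol_drop (j : Nat) (ls : List (List Int)) :
    pvCol j (ls.map (fun ch => ch.drop 1)) = pvCol (j + 1) ls := by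
  unfold pvCol
  rw [List.map_map]
  congr 1
  apply List.map_congr_left
  intro l _
  simp only [Function.comp_apply, List.getD_eq_getElem?_getD, List.getElem?_drop]
  congr 2
  omega

-- B-side characterisation: pvColSums lists the column sums, one per position
theorem pvColSums_eq (n : Nat) : ∀ ls : List (List Int), pvMx ls = n →
    pvColSums ls = (List.range n).map (fun j => pvCol j ls) := by
  induction n with
  | zero =>
    intro ls h
    rw [pvColSums]
    have hno : ¬ (ls.any (fun ch => !ch.isEmpty) = true) := by
      simp only [List.any_eq_true, not_exists]
      intro l hl
      have := pvMx_zero ls h l hl.1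
      subst this; simp at hl
    simp [hno]
  | succ n ih =>
    intro ls h
    rw [pvColSums]
    have hany : ls.any (fun ch => !ch.isEmpty) = true := by
      by_contra hno
      have hall : ∀ l ∈ ls, l = [] := by
        intro l hl
        simp only [List.any_eq_true, not_exists, not_and] at hno
        cases l with
        | nil => rfl
        | cons x xs => have := hno (x :: xs) hl; simp at this
      have := pvMx_of_all_nil ls hall
      omega
    simp only [hany, dif_pos]
    rw [ih _ (by rw [pvMx_drop, h]; omega)]
    rw [List.range_succ_eq_map, List.map_cons, pvHeads_sum, List.map_map]
    congr 1
    apply List.map_congr_left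
    intro j _
    simpa [Nat.succ_eq_add_one] using pvCol_drop j ls

-- A-side: the inner index loop adds row ch into acc pointwise
theorem pvRangeAdd (ch : List Int) (n : Nat) (acc : List Int) (hn : n ≤ acc.length) :
    ((List.range n).foldl (fun a k => a.set k (a.getD k 0 + ch.getD k 0)) acc).length = acc.length ∧
    ∀ j : Nat, ((List.range n).foldl (fun a k => a.set k (a.getD k 0 + ch.getD k 0)) acc).getD j 0
      = acc.getD j 0 + (if j < n then ch.getD j 0 else 0) := by
  induction n with
  | zero => simp
  | succ n ih =>
    obtain ⟨hl, hg⟩ := ih (Nat.le_of_succ_le hn)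
    rw [List.range_succ, List.foldl_append]
    simp only [List.foldl_cons, List.foldl_nil, List.getD_eq_getElem?_getD] at hl hg ⊢
    refine ⟨by rw [List.length_set, hl], fun j => ?_⟩
    rw [List.getElem?_set]
    have hlt : n < (List.foldl (fun a k => a.set k (a[k]?.getD 0 + ch[k]?.getD 0)) acc (List.range n)).length := by
      rw [hl]; omega
    by_cases hj : n = j
    · subst hj
      rw [if_pos rfl, if_pos hlt]
      simp only [Option.getD_some]
      rw [hg n]
      simp
    · rw [if_neg hj, hg j]
      congr 1
      by_cases h2 : j < n
      · rw [if_pos h2, if_pos (by omega)]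
      · rw [if_neg h2, if_neg (by omega)]

-- A's inner loop over pyRange with pySetD/pyGetD is the Nat-indexed set/getD loop
theorem pvInnerEq (ch acc : List Int) :
    (PySem.List.pyRange 0 (ch.length : Int) 1).foldl (fun a i =>
        PySem.List.pySetD a i (PySem.List.pyGetD a i 0 + PySem.List.pyGetD ch i 0)) acc
    = (List.range ch.length).foldl (fun a k => a.set k (a.getD k 0 + ch.getD k 0)) acc := by
  rw [PySem.List.pyRange_one, List.foldl_map]
  simp only [zero_add, Int.sub_zero, Int.toNat_natCast, PySem.List.pySetD_natCast,
    PySem.List.pyGetD_natCast]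

-- A-side: the outer fold accumulates all column sums
theorem pvOuter (ls : List (List Int)) : ∀ acc : List Int, (∀ l ∈ ls, l.length ≤ acc.length) →
    ((ls.foldl (fun combined ch =>
        (PySem.List.pyRange 0 (ch.length : Int) 1).foldl (fun a i =>
          PySem.List.pySetD a i (PySem.List.pyGetD a i 0 + PySem.List.pyGetD ch i 0)) combined) acc).length
      = acc.length ∧
    ∀ j : Nat, (ls.foldl (fun combined ch =>
        (PySem.List.pyRange 0 (ch.length : Int) 1).foldl (fun a i =>
          PySem.List.pySetD a i (PySem.List.pyGetD a i 0 + PySem.List.pyGetD ch i 0)) combined) acc).getD j 0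
      = acc.getD j 0 + pvCol j ls) := by
  induction ls with
  | nil => intro acc _; simp [pvCol]
  | cons c cs ih =>
    intro acc hle
    simp only [List.foldl_cons]
    rw [pvInnerEq c acc]
    obtain ⟨hl1, hg1⟩ := pvRangeAdd c c.length acc (hle c (List.mem_cons_self ..))
    obtain ⟨hl2, hg2⟩ := ih _ (fun l hl => by rw [hl1]; exact hle l (List.mem_cons_of_mem _ hl))
    refine ⟨hl2.trans hl1, fun j => ?_⟩
    rw [hg2 j, hg1 j]
    by_cases hj : j < c.length
    · simp [pvCol, hj]; ring
    · have hc : c.getD j 0 = 0 := by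
        rw [List.getD_eq_getElem?_getD, List.getElem?_eq_none (by omega)]; rfl
      rw [if_neg hj]
      simp only [pvCol, List.map_cons, List.sum_cons, hc]
      ring

theorem pvMaxLenEq (ls : List (List Int)) (h : ls ≠ []) :
    (PySem.List.max? (ls.map List.length) (fun x => x)).getD 0 = pvMx ls := by
  cases ls with
  | nil => exact absurd rfl h
  | cons c cs =>
    rw [List.map_cons, PySem.List.max?_id_cons]
    simp only [Option.getD_some]
    unfold pvMx
    rw [List.foldl_map]
    simp

theorem pvReplicateGetD (m j : Nat) : (List.replicate m (0 : Int)).getD j 0 = 0 := by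
  rw [List.getD_eq_getElem?_getD, List.getElem?_replicate]
  split <;> rfl

-- the two combination phases produce the same list
theorem pvCombinedEq (ls : List (List Int)) (h : ls ≠ []) :
    ls.foldl (fun combined ch =>
      (PySem.List.pyRange 0 (ch.length : Int) 1).foldl (fun acc i =>
        PySem.List.pySetD acc i (PySem.List.pyGetD acc i 0 + PySem.List.pyGetD ch i 0)) combined)
      (List.replicate ((PySem.List.max? (ls.map List.length) (fun x => x)).getD 0) (0 : Int))
    = pvColSums ls := by
  rw [pvMaxLenEq ls h]
  obtain ⟨hl, hg⟩ := pvOuter ls (List.replicate (pvMx ls) 0)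
    (fun l hl => by rw [List.length_replicate]; exact pvMx_spec ls l hl)
  rw [pvColSums_eq (pvMx ls) ls rfl]
  apply List.ext_getElem
  · rw [hl, List.length_replicate, List.length_map, List.length_range]
  · intro j hj hj2
    have h1 : _ = _ := hg j
    rw [pvReplicateGetD, zero_add] at h1
    rw [List.getElem_map, List.getElem_range]
    rw [← h1, List.getD_eq_getElem?_getD, List.getElem?_eq_getElem hj, Option.getD_some]

theorem pvFinal (chapters : List (List Int)) :
    summerBookSorter chapters = summerBookSorter_alt chapters := by
  unfold summerBookSorter summerBookSorter_alt
  by_cases h : chapters = []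
  · simp [h]
  · rw [if_neg h, if_neg h]
    dsimp only
    have hne : chapters.map (fun ch =>
        PySem.List.sorted ((PySem.List.slice? ch none none (-1)).getD []) (fun x => x) true) ≠ [] := by
      simpa using h
    rw [pvCombinedEq _ hne]

-- ===== VERDICT (by name: the statement is the Claim_ definition above) =====
theorem summerBookSorter_spec : Claim_equal_summerBookSorter := by
  intro chapters _
  unfold Spec_summerBookSorter
  exact pvFinal chapters
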